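-- pv_equiv track=rewrite | github.com/aroido/layoutrecall | scripts/sync-homebrew-tap.py | select_dmg_asset
-- ===== SOURCE A (Python) =====
-- def select_dmg_asset(release: dict, version: str) -> dict:
--     assets = release.get("assets", [])
--     candidates = [
--         asset
--         for asset in assets
--         if str(asset.get("name", "")).endswith(".dmg")
--         and not str(asset.get("name", "")).endswith(".dmg.blockmap")
--     ]
--
--     if not candidates:
--         raise RuntimeError("No DMG asset found on the GitHub release.")
--
--     versioned_name = f"LayoutRecall-{version}.dmg"
--     for asset in candidates:
--         if asset.get("name") == versioned_name:
--             return asset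
--
--     return candidates[0]
-- ===== SOURCE B (Python) =====
-- def select_dmg_asset(release: dict, version: str) -> dict:
--     versioned_name = f"LayoutRecall-{version}.dmg"
--     first_candidate = None
--     for asset in release.get("assets", []):
--         name = str(asset.get("name", ""))
--         if not name.endswith(".dmg") or name.endswith(".dmg.blockmap"):
--             continue
--         if name == versioned_name:
--             return asset
--         if first_candidate is None:
--             first_candidate = asset
--     if first_candidate is None:
--         raise RuntimeError("No DMG asset found on the GitHub release.")
--     return first_candidate
-- ===== Notes on version B (the rewrite author's own statement) =====
-- stated objective: alternative
-- what changed: B fuses A's two passes (build candidate list, then scan it for the versioned name) into one loop over the assets that returns the versioned match immediately and otherwise remembers only the first candidate.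
import Mathlib
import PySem

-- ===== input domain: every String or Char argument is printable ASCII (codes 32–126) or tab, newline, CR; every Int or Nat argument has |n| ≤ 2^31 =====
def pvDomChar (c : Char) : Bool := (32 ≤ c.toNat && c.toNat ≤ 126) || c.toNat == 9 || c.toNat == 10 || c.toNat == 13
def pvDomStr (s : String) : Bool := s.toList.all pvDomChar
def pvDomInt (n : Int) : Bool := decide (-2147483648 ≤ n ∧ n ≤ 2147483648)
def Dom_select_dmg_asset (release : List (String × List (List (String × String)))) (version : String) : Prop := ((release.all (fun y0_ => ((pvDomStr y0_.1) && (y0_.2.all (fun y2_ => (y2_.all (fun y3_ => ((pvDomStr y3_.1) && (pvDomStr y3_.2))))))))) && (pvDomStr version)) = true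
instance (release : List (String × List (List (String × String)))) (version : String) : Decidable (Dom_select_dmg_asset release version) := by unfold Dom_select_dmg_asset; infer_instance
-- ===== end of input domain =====

-- B fuses A's build-then-scan into one pass over the assets (alternative decomposition, same cost);
-- Pre_ excludes exactly the inputs where A raises RuntimeError (no DMG candidate), where B raises too.


-- dict.get on a plain association list (first match), shared helper
def pvGetA {α : Type} (d : List (String × α)) (k : String) : Option α :=
  (d.find? (fun kv => kv.1 == k)).map (·.2)

-- the candidate test str(asset.get("name","")).endswith(".dmg") and not ….endswith(".dmg.blockmap")
def pvIsCand (a : List (String × String)) : Bool :=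
  PySem.Str.endswith ((pvGetA a "name").getD "") ".dmg"
    && !PySem.Str.endswith ((pvGetA a "name").getD "") ".dmg.blockmap"

-- ===== PORT A =====
def select_dmg_asset (release : List (String × List (List (String × String)))) (version : String) : List (String × String) :=
  let assets := (pvGetA release "assets").getD []
  let candidates := assets.filter pvIsCand
  -- Python raises RuntimeError when candidates == []; excluded by Pre_ (headD is never reached empty there)
  let versioned_name := "LayoutRecall-" ++ version ++ ".dmg"
  match candidates.find? (fun a => pvGetA a "name" == some versioned_name) with
  | some a => a
  | none => candidates.headD []

-- ===== PORT B =====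
-- one pass: early return on the versioned name, otherwise remember the first candidate
def pvLoopB (versioned : String) (acc : Option (List (String × String))) :
    List (List (String × String)) → Option (List (String × String))
  | [] => acc
  | a :: rest =>
    let name := (pvGetA a "name").getD ""
    if PySem.Str.endswith name ".dmg" && !PySem.Str.endswith name ".dmg.blockmap" then
      if name == versioned then some a
      else pvLoopB versioned (acc.orElse (fun _ => some a)) rest
    else pvLoopB versioned acc rest

def select_dmg_asset_alt (release : List (String × List (List (String × String)))) (version : String) : List (String × String) :=
  let versioned_name := "LayoutRecall-" ++ version ++ ".dmg"
  -- Python raises RuntimeError when the loop finds no candidate; excluded by Pre_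
  (pvLoopB versioned_name none ((pvGetA release "assets").getD [])).getD []

-- ===== PRECONDITION & SPEC =====
-- Pre_ excludes exactly the inputs on which A raises RuntimeError: releases whose asset list holds no DMG candidate.
def Pre_select_dmg_asset (release : List (String × List (List (String × String)))) (version : String) : Prop :=
  ((pvGetA release "assets").getD []).any pvIsCand = true
instance (release : List (String × List (List (String × String)))) (version : String) : Decidable (Pre_select_dmg_asset release version) := by unfold Pre_select_dmg_asset; infer_instance

def pvWitness_select_dmg_asset : (List (String × List (List (String × String)))) × String :=
  ([("assets", [[("name", "a.dmg")], [("name", "LayoutRecall-1.dmg")]])], "1")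

def Spec_select_dmg_asset (release : List (String × List (List (String × String)))) (version : String) (out : List (String × String)) : Prop := out = select_dmg_asset_alt release version
instance (release : List (String × List (List (String × String)))) (version : String) (out : List (String × String)) : Decidable (Spec_select_dmg_asset release version out) := by unfold Spec_select_dmg_asset; infer_instance

-- ===== CLAIM (what is proved, stated in full; the proofs are below) =====
def Claim_equal_select_dmg_asset : Prop := ∀ (release : List (String × List (List (String × String)))) (version : String), Dom_select_dmg_asset release version → Pre_select_dmg_asset release version → Spec_select_dmg_asset release version (select_dmg_asset release version)

-- ===== LEMMAS AND PROOFS =====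

theorem pvVersioned_ne_empty (v : String) : ("LayoutRecall-" ++ v ++ ".dmg") ≠ "" := by
  intro h
  have := congrArg String.length h
  simp [String.length_append] at this

-- the two versioned-name tests agree once the versioned name is nonempty
theorem pvQ_eq (versioned : String) (h : versioned ≠ "") (a : List (String × String)) :
    (pvGetA a "name" == some versioned) = (((pvGetA a "name").getD "") == versioned) := by
  cases hg : pvGetA a "name" with
  | none =>
    simp only [Option.getD_none]
    rw [show (("" : String) == versioned) = false from beq_eq_false_iff_ne.mpr (fun he => h he.symm)]
    simp
  | some v => simp

-- B's loop computes: the first candidate named `versioned`, else acc, else the first candidate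
theorem pvLoopB_spec (versioned : String) (l : List (List (String × String)))
    (acc : Option (List (String × String))) :
    pvLoopB versioned acc l =
      match (l.filter pvIsCand).find? (fun a => ((pvGetA a "name").getD "") == versioned) with
      | some a => some a
      | none => acc.orElse (fun _ => (l.filter pvIsCand).head?) := by
  induction l generalizing acc with
  | nil => cases acc <;> rfl
  | cons a rest ih =>
    have hstep : pvLoopB versioned acc (a :: rest) =
        if pvIsCand a = true then
          (if (((pvGetA a "name").getD "") == versioned) = true then some a
           else pvLoopB versioned (acc.orElse (fun _ => some a)) rest)
        else pvLoopB versioned acc rest := rfl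
    rw [hstep, List.filter_cons]
    by_cases hc : pvIsCand a = true
    · rw [if_pos hc, if_pos hc]
      by_cases hq : (((pvGetA a "name").getD "") == versioned) = true
      · rw [if_pos hq]
        simp only [List.find?_cons, hq]
      · have hq' : (((pvGetA a "name").getD "") == versioned) = false := by
          simpa using hq
        rw [if_neg hq, ih]
        simp only [List.find?_cons, hq']
        cases hf : (rest.filter pvIsCand).find? (fun a => ((pvGetA a "name").getD "") == versioned) with
        | some b => rfl
        | none => cases acc <;> rfl
    · rw [if_neg hc, if_neg hc, ih]

-- ===== VERDICT (by name: the statement is the Claim_ definition above) =====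
theorem select_dmg_asset_spec : Claim_equal_select_dmg_asset := by
  intro release version _hdom hpre
  unfold Spec_select_dmg_asset
  have hA : select_dmg_asset release version =
      (match (((pvGetA release "assets").getD []).filter pvIsCand).find?
          (fun a => pvGetA a "name" == some ("LayoutRecall-" ++ version ++ ".dmg")) with
       | some a => a
       | none => (((pvGetA release "assets").getD []).filter pvIsCand).headD []) := rfl
  have hB : select_dmg_asset_alt release version =
      (pvLoopB ("LayoutRecall-" ++ version ++ ".dmg") none ((pvGetA release "assets").getD [])).getD [] := rfl
  rw [hA, hB, pvLoopB_spec]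
  rw [← funext (pvQ_eq ("LayoutRecall-" ++ version ++ ".dmg") (pvVersioned_ne_empty version))]
  have hfil : (((pvGetA release "assets").getD []).filter pvIsCand) ≠ [] := by
    intro h
    unfold Pre_select_dmg_asset at hpre
    obtain ⟨x, hx, hpx⟩ := List.any_eq_true.mp hpre
    exact absurd hpx (by simpa using List.filter_eq_nil_iff.mp h x hx)
  cases hf : (((pvGetA release "assets").getD []).filter pvIsCand).find?
      (fun a => pvGetA a "name" == some ("LayoutRecall-" ++ version ++ ".dmg")) with
  | some a => rfl
  | none =>
    cases hl : ((pvGetA release "assets").getD []).filter pvIsCand with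
    | nil => exact absurd hl hfil
    | cons b bs => rfl
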